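-- pv_equiv track=rewrite | github.com/naufalbasara/python-algorithm-exercise | prep.py | foo
-- ===== SOURCE A (Python) =====
-- def foo(arr, a, b, i, j):
--     k = j
--     ct =0
--
--     while k > i-1:
--         if arr[k] <= b and not arr[k]<=a:
--             ct+=1
--
--         k-=1
--
--     return ct
-- ===== SOURCE B (Python) =====
-- def foo(arr, a, b, i, j):
--     # inclusion-exclusion: count(a < x <= b) = count(x <= b) - count(x <= min(a, b))
--     lo = min(a, b)
--     le_b = 0
--     for k in range(i, j + 1):
--         if arr[k] <= b:
--             le_b += 1
--     le_lo = 0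
--     for k in range(i, j + 1):
--         if arr[k] <= lo:
--             le_lo += 1
--     return le_b - le_lo
-- ===== Notes on version B (the rewrite author's own statement) =====
-- stated objective: alternative
-- what changed: Replaces the backward while-loop with a single compound test by two forward single-predicate counting passes (count <= b minus count <= min(a,b), inclusion-exclusion).
import Mathlib
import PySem

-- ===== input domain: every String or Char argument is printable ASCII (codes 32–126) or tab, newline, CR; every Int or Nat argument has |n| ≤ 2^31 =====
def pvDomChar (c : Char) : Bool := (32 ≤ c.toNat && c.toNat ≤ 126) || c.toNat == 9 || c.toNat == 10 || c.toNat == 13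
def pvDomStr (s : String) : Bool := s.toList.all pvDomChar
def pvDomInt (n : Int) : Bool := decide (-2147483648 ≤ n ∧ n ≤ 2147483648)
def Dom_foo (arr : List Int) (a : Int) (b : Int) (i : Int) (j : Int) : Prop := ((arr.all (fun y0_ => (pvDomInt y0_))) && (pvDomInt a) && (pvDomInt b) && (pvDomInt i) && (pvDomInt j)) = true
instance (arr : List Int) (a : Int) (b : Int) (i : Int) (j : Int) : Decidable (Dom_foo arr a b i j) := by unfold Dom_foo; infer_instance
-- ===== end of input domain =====

-- B replaces A's backward compound-condition while-loop by two forward single-predicate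
-- counting passes combined by inclusion-exclusion ('alternative', not claimed faster).

-- ===== PORT A =====
-- the while-loop of A: k counts down from j while k > i-1
def fooLoop (arr : List Int) (a : Int) (b : Int) (i : Int) (k : Int) (ct : Int) : Int :=
  if _h : k > i - 1 then
    fooLoop arr a b i (k - 1)
      (match PySem.List.pyGet? arr k with
       | some v => if v ≤ b ∧ ¬ v ≤ a then ct + 1 else ct
       | none => ct)  -- IndexError in Python; excluded by Pre_foo
  else ct
termination_by (k - (i - 1)).toNat
decreasing_by omega

def foo (arr : List Int) (a : Int) (b : Int) (i : Int) (j : Int) : Int :=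
  fooLoop arr a b i j 0

-- ===== PORT B =====
-- one forward counting pass: number of k in range(i, j+1) with arr[k] <= t
def countLe (arr : List Int) (i : Int) (j : Int) (t : Int) : Int :=
  (PySem.List.pyRange i (j + 1) 1).foldl
    (fun c k => if (PySem.List.pyGet? arr k).getD 0 ≤ t then c + 1 else c) 0
    -- .getD 0: IndexError in Python; excluded by Pre_foo

def foo_alt (arr : List Int) (a : Int) (b : Int) (i : Int) (j : Int) : Int :=
  countLe arr i j b - countLe arr i j (min a b)

-- ===== PRECONDITION & SPEC =====
-- Pre_ excludes exactly the inputs where some accessed index k ∈ [i, j] is out of Python's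
-- index range for arr (both A and B raise IndexError there).
def Pre_foo (arr : List Int) (a : Int) (b : Int) (i : Int) (j : Int) : Prop :=
  i ≤ j → (-(arr.length : Int) ≤ i ∧ j < (arr.length : Int))
instance (arr : List Int) (a : Int) (b : Int) (i : Int) (j : Int) : Decidable (Pre_foo arr a b i j) := by unfold Pre_foo; infer_instance

def pvWitness_foo : List Int × Int × Int × Int × Int := ([1, 2, 3, 4], 1, 3, 0, 3)

def Spec_foo (arr : List Int) (a : Int) (b : Int) (i : Int) (j : Int) (out : Int) : Prop := out = foo_alt arr a b i j
instance (arr : List Int) (a : Int) (b : Int) (i : Int) (j : Int) (out : Int) : Decidable (Spec_foo arr a b i j out) := by unfold Spec_foo; infer_instance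

-- ===== CLAIM (what is proved, stated in full; the proofs are below) =====
def Claim_equal_foo : Prop := ∀ (arr : List Int) (a : Int) (b : Int) (i : Int) (j : Int), Dom_foo arr a b i j → Pre_foo arr a b i j → Spec_foo arr a b i j (foo arr a b i j)

-- ===== LEMMAS AND PROOFS =====

-- splitting off the last index of a counting pass
lemma countLe_succ (arr : List Int) (i k t : Int) (hik : i ≤ k) :
    countLe arr i k t
      = countLe arr i (k - 1) t
        + (if (PySem.List.pyGet? arr k).getD 0 ≤ t then (1 : Int) else 0) := by
  unfold countLe
  have h : k - 1 + 1 = k := by omega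
  have hr : PySem.List.pyRange i (k + 1) 1
      = PySem.List.pyRange i (k - 1 + 1) 1 ++ [k] := by
    rw [h]
    exact PySem.List.pyRange_one_succ_right hik
  rw [hr, List.foldl_append]
  simp [List.foldl]
  split_ifs <;> simp

lemma countLe_nil (arr : List Int) (i k t : Int) (h : k < i) :
    countLe arr i k t = 0 := by
  unfold countLe
  rw [PySem.List.pyRange_one_eq_nil (by omega)]
  rfl

-- invariant of A's loop: it computes the inclusion-exclusion difference of two counts
lemma fooLoop_eq (arr : List Int) (a b i : Int) :
    ∀ (n : Nat) (k ct : Int), (k - (i - 1)).toNat = n →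
      (i ≤ k → (-(arr.length : Int) ≤ i ∧ k < (arr.length : Int))) →
      fooLoop arr a b i k ct
        = ct + countLe arr i k b - countLe arr i k (min a b) := by
  intro n
  induction n with
  | zero =>
      intro k ct hn _
      rw [fooLoop]
      have hk : ¬ k > i - 1 := by omega
      simp only [hk, dite_false]
      rw [countLe_nil arr i k b (by omega), countLe_nil arr i k (min a b) (by omega)]
      ring
  | succ n ih =>
      intro k ct hn hbound
      have hik : i ≤ k := by omega
      obtain ⟨hlo, hhi⟩ := hbound hik
      have hsome : PySem.List.pyGet? arr k ≠ none := by
        intro hc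
        rw [PySem.List.pyGet?_eq_none_iff] at hc
        exact hc ⟨by omega, by omega⟩
      obtain ⟨v, hv⟩ := Option.ne_none_iff_exists'.mp hsome
      rw [fooLoop]
      have hk : k > i - 1 := by omega
      simp only [hk, dite_true, hv]
      rw [ih (k - 1) _ (by omega)
            (fun h => ⟨hlo, by omega⟩)]
      rw [countLe_succ arr i k b hik, countLe_succ arr i k (min a b) hik, hv]
      simp only [Option.getD_some]
      by_cases h1 : v ≤ b <;> by_cases h2 : v ≤ a <;>
        simp [h1, h2] <;> ring

-- ===== VERDICT (by name: the statement is the Claim_ definition above) =====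
theorem foo_spec : Claim_equal_foo := by
  intro arr a b i j _ hpre
  unfold Spec_foo foo foo_alt
  rw [fooLoop_eq arr a b i ((j - (i - 1)).toNat) j 0 rfl hpre]
  ring
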